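-- pv_equiv track=rewrite | github.com/minchae9/TIL | algorithm/1218/PR_문자열압축.py | solution
-- ===== SOURCE A (Python) =====
-- def solution(s):
--     length = 10000
--     # 길이가 1
--     if len(s) < 2:
--         length = 1
--     # 길이가 2 이상
--     else:
--         for interval in range(1, len(s)):   # interval: 압축 단위
--             prev = ''
--             cnt = 0
--             res = ''
--             start = 0
--             while True:
--                 finish = start + interval
--                 if finish > len(s): # 남은 문자열 개수보다 압축 단위가 클 경우
--                     if start < len(s):
--                         if cnt > 1:
--                             res += str(cnt)
--                         res += prev
--                         cnt = 1
--                         prev = s[start:]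
--                     break
--                 term = s[start:finish]
--                 start += interval
--                 if prev == '':
--                     prev = term
--                     cnt += 1
--                 else:
--                     if term == prev:
--                         cnt += 1
--                     else:
--                         if cnt > 1:
--                             res += str(cnt)
--                         res += prev
--                         prev = term
--                         cnt = 1
--             if cnt > 1:
--                 res += str(cnt)
--             res += prev
--             if len(res) < length:
--                 length = len(res)
--     return length
-- ===== SOURCE B (Python) =====
-- def solution(s):
--     n = len(s)
--     if n < 2:
--         return 1
--     best = 10000
--     for k in range(1, n):
--         # ext[i] = length of the longest common prefix of s[i:] and s[i+k:]
--         # (stride-k longest-common-extension array, built right to left)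
--         ext = [0] * (n + 1)
--         for i in range(n - k - 1, -1, -1):
--             if s[i] == s[i + k]:
--                 ext[i] = ext[i + 1] + 1
--         full = n // k
--         cost = k + n % k        # first block plus the short trailing block
--         run = 1
--         for b in range(1, full):
--             if ext[(b - 1) * k] >= k:   # block b repeats block b-1
--                 run += 1
--             else:
--                 cost += (len(str(run)) if run > 1 else 0) + k
--                 run = 1
--         cost += len(str(run)) if run > 1 else 0
--         best = min(best, cost)
--     return best
-- ===== Notes on version B (the rewrite author's own statement) =====
-- stated objective: alternative
-- what changed: Replaces A's per-unit-size chunk-slicing loop with prev/cnt/res state that concatenates a result string by a longest-common-extension approach: for each unit size k, B first builds a stride-k match-length array ext (right-to-left character recurrence ext[i] = ext[i+1]+1 if s[i]==s[i+k] else 0), then scans block indices detecting run boundaries with an O(1) ext lookup instead of slicing and comparing chunks, accumulating the compressed length arithmetically; it keeps the same initial bound 10000 on the running minimum that A uses, so the two agree on every input.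
import Mathlib
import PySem

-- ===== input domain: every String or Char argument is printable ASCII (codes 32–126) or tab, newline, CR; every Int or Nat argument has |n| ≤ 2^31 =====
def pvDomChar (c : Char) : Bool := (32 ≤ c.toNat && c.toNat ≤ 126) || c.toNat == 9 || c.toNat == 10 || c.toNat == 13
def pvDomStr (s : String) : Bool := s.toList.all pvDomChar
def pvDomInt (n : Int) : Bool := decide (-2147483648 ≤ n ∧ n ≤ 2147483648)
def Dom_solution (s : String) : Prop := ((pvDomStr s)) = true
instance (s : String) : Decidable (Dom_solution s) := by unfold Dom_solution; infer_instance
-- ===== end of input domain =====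

-- B replaces A's chunk-slicing loop that concatenates a result string by a stride-k
-- longest-common-extension recurrence plus an arithmetic block scan (objective: alternative).

-- ===== PORT A =====
-- A's inner 'while True' loop: state (prev, cnt, res); fuel only makes the recursion total
-- (fuel = len(s)+1 always suffices since start grows by interval ≥ 1 each pass).
def solLoopA (cs : List Char) (interval : Int) : Nat → Int → List Char → Int → List Char →
    List Char × Int × List Char
  | 0, _, prev, cnt, res => (prev, cnt, res)
  | fuel + 1, start, prev, cnt, res =>
    let finish := start + interval
    if finish > (cs.length : Int) then
      if start < (cs.length : Int) then
        (PySem.List.slice cs (some start) none, 1,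
          res ++ (if cnt > 1 then PySem.Int.toChars cnt else []) ++ prev)
      else (prev, cnt, res)
    else
      let term := PySem.List.slice cs (some start) (some finish)
      if prev = [] then solLoopA cs interval fuel (start + interval) term (cnt + 1) res
      else if term = prev then solLoopA cs interval fuel (start + interval) prev (cnt + 1) res
      else solLoopA cs interval fuel (start + interval) term 1
        (res ++ (if cnt > 1 then PySem.Int.toChars cnt else []) ++ prev)

def solution (s : String) : Int :=
  let cs := s.toList
  if (cs.length : Int) < 2 then 1
  else
    (PySem.List.pyRange 1 (cs.length : Int) 1).foldl
      (fun length interval =>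
        let st := solLoopA cs interval (cs.length + 1) 0 [] 0 []
        let res := st.2.2 ++ (if st.2.1 > 1 then PySem.Int.toChars st.2.1 else []) ++ st.1
        if (res.length : Int) < length then (res.length : Int) else length)
      10000

-- ===== PORT B =====
-- Source B's ext array: ext[i] = longest common prefix of s[i:] and s[i+k:], computed by the
-- right-to-left recurrence 'ext[i] = ext[i+1] + 1 if s[i] == s[i+k] else 0' (here as the
-- same recurrence in recursive form; the guard i+k < len is Python's loop bound).
def extB (cs : List Char) (k : Nat) (i : Nat) : Nat :=
  if h : i + k < cs.length ∧ cs[i]? = cs[i + k]? then extB cs k (i + 1) + 1 else 0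
termination_by cs.length - i
decreasing_by omega

-- per-unit-size cost: 'cost = k + n % k; run = 1; for b in range(1, full): …; cost += digits'
def costB (cs : List Char) (K : Nat) : Int :=
  let full := cs.length / K
  let st := (List.range' 1 (full - 1)).foldl
    (fun (st : Int × Int) b =>
      if K ≤ extB cs K ((b - 1) * K) then (st.1, st.2 + 1)
      else (st.1 + (if st.2 > 1 then ((PySem.Int.toChars st.2).length : Int) else 0) + (K : Int), 1))
    ((K : Int) + ((cs.length % K : Nat) : Int), 1)
  st.1 + (if st.2 > 1 then ((PySem.Int.toChars st.2).length : Int) else 0)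

def solution_alt (s : String) : Int :=
  let cs := s.toList
  if (cs.length : Int) < 2 then 1
  else
    -- 'for k in range(1, n): best = min(best, cost)'; k.toNat is exact: every k here is ≥ 1
    (PySem.List.pyRange 1 (cs.length : Int) 1).foldl
      (fun best k => min best (costB cs k.toNat)) 10000

-- ===== PRECONDITION & SPEC =====
def Spec_solution (s : String) (out : Int) : Prop := out = solution_alt s
instance (s : String) (out : Int) : Decidable (Spec_solution s out) := by unfold Spec_solution; infer_instance

-- ===== CLAIM (what is proved, stated in full; the proofs are below) =====
def Claim_equal_solution : Prop := ∀ (s : String), Dom_solution s → Spec_solution s (solution s)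

-- ===== LEMMAS AND PROOFS =====

-- chunking as a plain structural recursion (chunk size = km1+1)
def splitChunks (km1 : Nat) (l : List Char) : List (List Char) :=
  if h : l = [] then [] else l.take (km1 + 1) :: splitChunks km1 (l.drop (km1 + 1))
termination_by l.length
decreasing_by
  have : 0 < l.length := List.length_pos_iff.mpr h
  simp [List.length_drop]; omega

-- A's loop, abstracted to the chunk list it consumes
def processChunks : List (List Char) → List Char → Int → List Char → List Char × Int × List Char
  | [], prev, cnt, res => (prev, cnt, res)
  | t :: rest, prev, cnt, res =>
    if prev = [] then processChunks rest t (cnt + 1) res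
    else if t = prev then processChunks rest prev (cnt + 1) res
    else processChunks rest t 1 (res ++ (if cnt > 1 then PySem.Int.toChars cnt else []) ++ prev)

def finalLen (st : List Char × Int × List Char) : Int :=
  ((st.2.2 ++ (if st.2.1 > 1 then PySem.Int.toChars st.2.1 else []) ++ st.1).length : Int)

def digC (cnt : Int) : Int := if cnt > 1 then ((PySem.Int.toChars cnt).length : Int) else 0

-- cost of A's remaining work given an open run (prev, cnt)
def costFrom (prev : List Char) (cnt : Int) : List (List Char) → Int
  | [] => digC cnt + (prev.length : Int)
  | t :: rest =>
    if t = prev then costFrom prev (cnt + 1) rest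
    else digC cnt + (prev.length : Int) + costFrom t 1 rest

lemma loopA_eq (cs : List Char) (K : Nat) (hK : 1 ≤ K) :
    ∀ (fuel j : Nat) (prev : List Char) (cnt : Int) (res : List Char),
      j ≤ cs.length → cs.length - j + 1 ≤ fuel →
      (prev = [] → cnt = 0) → (prev ≠ [] → prev.length = K) →
      solLoopA cs (K : Int) fuel (j : Int) prev cnt res =
        processChunks (splitChunks (K - 1) (cs.drop j)) prev cnt res := by
  intro fuel
  induction fuel with
  | zero => intro j prev cnt res hj hf _ _; omega
  | succ fuel ih =>
    intro j prev cnt res hj hf hinv1 hinv2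
    have hK1 : K - 1 + 1 = K := by omega
    have hcast : (j : Int) + (K : Int) = ((j + K : Nat) : Int) := by push_cast; ring
    rw [solLoopA]
    by_cases hfin : (cs.length : Int) < (j : Int) + (K : Int)
    · -- break branch
      rw [if_pos hfin]
      have hnjK : cs.length < j + K := by exact_mod_cast hfin
      by_cases hjn : j < cs.length
      · rw [if_pos (by exact_mod_cast hjn)]
        have hdne : cs.drop j ≠ [] := by
          intro h; have := List.drop_eq_nil_iff.mp h; omega
        rw [splitChunks, dif_neg hdne, hK1]
        have htake : (cs.drop j).take K = cs.drop j := by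
          apply List.take_of_length_le; simp [List.length_drop]; omega
        have hrest : splitChunks (K - 1) ((cs.drop j).drop K) = [] := by
          rw [List.drop_drop, splitChunks, dif_pos (List.drop_eq_nil_of_le (by omega))]
        rw [htake, hrest]
        rw [PySem.List.slice_from_natCast]
        by_cases hp : prev = []
        · rw [processChunks, if_pos hp]
          rw [processChunks]
          have hc0 : cnt = 0 := hinv1 hp
          subst hp hc0
          norm_num
        · rw [processChunks, if_neg hp]
          have hne : cs.drop j ≠ prev := by
            intro h
            have h1 : (cs.drop j).length = prev.length := by rw [h]
            rw [List.length_drop, hinv2 hp] at h1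
            omega
          rw [if_neg hne, processChunks]
      · have hje : cs.length ≤ j := by omega
        rw [if_neg (by exact_mod_cast (by omega : ¬ ((j:Int) < (cs.length : Int))))]
        rw [splitChunks, dif_pos (List.drop_eq_nil_of_le hje), processChunks]
    · -- recurse branch
      rw [if_neg hfin]
      have hjK : j + K ≤ cs.length := by
        have : ((j : Int) + (K : Int)) ≤ (cs.length : Int) := by omega
        exact_mod_cast this
      have hjn : j < cs.length := by omega
      have hdne : cs.drop j ≠ [] := by
        intro h; have := List.drop_eq_nil_iff.mp h; omega
      have hterm : PySem.List.slice cs (some (j : Int)) (some ((j : Int) + (K : Int)))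
          = (cs.drop j).take K := by
        rw [PySem.List.slice_natCast_add cs j K]
      have htermlen : ((cs.drop j).take K).length = K := by
        simp [List.length_drop]; omega
      have htermne : (cs.drop j).take K ≠ [] := by
        intro h; rw [h] at htermlen; simp at htermlen; omega
      rw [splitChunks, dif_neg hdne, hK1]
      have hrest : (cs.drop j).drop K = cs.drop (j + K) := by
        rw [List.drop_drop]
      rw [hrest]
      simp only [hterm]
      simp only [hcast]
      by_cases hp : prev = []
      · rw [if_pos hp, processChunks, if_pos hp]
        exact ih (j + K) _ _ _ hjK (by omega) (by intro h; exact absurd h htermne)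
          (fun _ => htermlen)
      · rw [if_neg hp, processChunks, if_neg hp]
        by_cases he : (cs.drop j).take K = prev
        · rw [if_pos he, if_pos he]
          exact ih (j + K) _ _ _ hjK (by omega) (fun h => absurd h hp) hinv2
        · rw [if_neg he, if_neg he]
          exact ih (j + K) _ _ _ hjK (by omega) (by intro h; exact absurd h htermne)
            (fun _ => htermlen)

lemma processChunks_len (l : List (List Char)) :
    ∀ (prev : List Char) (cnt : Int) (res : List Char), [] ∉ l → prev ≠ [] →
      finalLen (processChunks l prev cnt res) = (res.length : Int) + costFrom prev cnt l := by
  induction l with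
  | nil =>
    intro prev cnt res _ hp
    simp only [processChunks, finalLen, costFrom, digC]
    by_cases h : cnt > 1 <;> simp [h]
  | cons t rest ih =>
    intro prev cnt res hl hp
    have hl' : [] ∉ rest := fun h => hl (List.mem_cons_of_mem _ h)
    rw [processChunks, if_neg hp, costFrom]
    by_cases he : t = prev
    · rw [if_pos he, if_pos he, ih prev (cnt + 1) res hl' hp]
    · rw [if_neg he, if_neg he]
      have htne : t ≠ [] := fun h => hl (h ▸ List.mem_cons_self)
      rw [ih t 1 _ hl' htne]
      simp only [digC, List.length_append]
      by_cases h : cnt > 1 <;> simp [h] <;> omega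

lemma splitChunksAux_no_nil (K : Nat) : ∀ (n : Nat) (l : List Char), l.length ≤ n →
    [] ∉ splitChunks K l := by
  intro n
  induction n with
  | zero =>
    intro l h
    have : l = [] := List.eq_nil_of_length_eq_zero (by omega)
    rw [this, splitChunks]
    simp
  | succ n ih =>
    intro l h
    rw [splitChunks]
    by_cases hl : l = []
    · simp [hl]
    · rw [dif_neg hl]
      intro hmem
      rcases List.mem_cons.mp hmem with h1 | h2
      · have : 0 < l.length := List.length_pos_iff.mpr hl
        have : (l.take (K + 1)).length = 0 := by rw [← h1]; rfl
        rw [List.length_take] at this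
        omega
      · exact ih (l.drop (K + 1)) (by simp [List.length_drop]; omega) h2

lemma splitChunks_no_nil (K : Nat) (l : List Char) : [] ∉ splitChunks K l :=
  splitChunksAux_no_nil K l.length l (le_refl _)

-- the ext recurrence detects equality of the two K-blocks at distance K
lemma ext_ge_iff (cs : List Char) (k : Nat) :
    ∀ (c i : Nat), i + k + c ≤ cs.length →
      (c ≤ extB cs k i ↔ (cs.drop i).take c = (cs.drop (i + k)).take c) := by
  intro c
  induction c with
  | zero => intro i _; simp
  | succ c ih =>
    intro i hc
    have hik : i + k < cs.length := by omega
    have hi : i < cs.length := by omega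
    rw [extB]
    rw [List.drop_eq_getElem_cons hi, List.drop_eq_getElem_cons hik]
    rw [List.take_succ_cons, List.take_succ_cons]
    by_cases he : cs[i] = cs[i + k]
    · rw [dif_pos ⟨hik, by simp [hi, hik, he]⟩]
      constructor
      · intro h
        have hc' : c ≤ extB cs k (i + 1) := by omega
        have := (ih (i + 1) (by omega)).mp hc'
        rw [show i + 1 + k = i + k + 1 by omega] at this
        simp [he, this]
      · intro h
        have h2 := (List.cons.injEq _ _ _ _).mp h
        have := (ih (i + 1) (by omega)).mpr (by
          rw [show i + 1 + k = i + k + 1 by omega]; exact h2.2)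
        omega
    · rw [dif_neg (by
        intro h
        exact he (by
          have := h.2
          rw [List.getElem?_eq_getElem hi, List.getElem?_eq_getElem hik] at this
          exact Option.some.injEq _ _ ▸ (by simpa using this)))]
      constructor
      · intro h; omega
      · intro h
        exact absurd ((List.cons.injEq _ _ _ _).mp h).1 he

-- B's block scan computes A's remaining cost over the chunk list
lemma scan_eq (cs : List Char) (K : Nat) (hK : 1 ≤ K) :
    ∀ (m b : Nat), 1 ≤ b → b ≤ cs.length / K → cs.length / K - b = m →
    ∀ (cost r : Int),
      (let st := (List.range' b (cs.length / K - b)).foldl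
          (fun (st : Int × Int) b =>
            if K ≤ extB cs K ((b - 1) * K) then (st.1, st.2 + 1)
            else (st.1 + (if st.2 > 1 then ((PySem.Int.toChars st.2).length : Int) else 0) + (K : Int), 1))
          (cost, r)
       st.1 + digC st.2) + (K : Int) + ((cs.length % K : Nat) : Int)
      = cost + costFrom ((cs.drop ((b - 1) * K)).take K) r
          (splitChunks (K - 1) (cs.drop (b * K))) := by
  intro m
  induction m with
  | zero =>
    intro b hb1 hbf hm cost r
    have hbe : b = cs.length / K := by omega
    have hdm : cs.length / K * K + cs.length % K = cs.length := by
      rw [Nat.mul_comm]; exact Nat.div_add_mod _ _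
    have hmlt : cs.length % K < K := Nat.mod_lt _ (by omega)
    have hsub : (cs.length / K - 1) * K = cs.length / K * K - K := by
      rw [Nat.sub_mul, one_mul]
    have hKle : K ≤ cs.length / K * K := by
      calc K = 1 * K := (one_mul K).symm
        _ ≤ cs.length / K * K := Nat.mul_le_mul_right K (le_trans hb1 hbf)
    subst hbe
    rw [hm, List.range'_zero, List.foldl_nil]
    have hprevlen : ((cs.drop ((cs.length / K - 1) * K)).take K).length = K := by
      simp [List.length_drop, hsub]; omega
    have hdroplen : (cs.drop ((cs.length / K) * K)).length = cs.length % K := by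
      simp [List.length_drop]; omega
    by_cases htl : cs.length % K = 0
    · have : cs.drop ((cs.length / K) * K) = [] := by
        apply List.eq_nil_of_length_eq_zero; omega
      rw [this, splitChunks, dif_pos rfl, costFrom, hprevlen, htl]
      push_cast; omega
    · have hdne : cs.drop ((cs.length / K) * K) ≠ [] := by
        intro h; rw [h] at hdroplen; simp at hdroplen; omega
      rw [splitChunks, dif_neg hdne, show K - 1 + 1 = K by omega]
      have htake : (cs.drop ((cs.length / K) * K)).take K = cs.drop ((cs.length / K) * K) := by
        apply List.take_of_length_le; omega
      have hrest : splitChunks (K - 1) ((cs.drop ((cs.length / K) * K)).drop K) = [] := by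
        rw [List.drop_drop, splitChunks, dif_pos (by
          apply List.eq_nil_of_length_eq_zero; simp [List.length_drop]; omega)]
      rw [htake, hrest, costFrom, if_neg (by
        intro h
        have := congrArg List.length h
        rw [hdroplen, hprevlen] at this
        omega)]
      rw [costFrom, hprevlen, hdroplen]
      have : digC 1 = 0 := by simp [digC]
      rw [this]
      push_cast; omega
  | succ m ih =>
    intro b hb1 hbf hm cost r
    have hblt : b < cs.length / K := by omega
    have hdm : cs.length / K * K + cs.length % K = cs.length := by
      rw [Nat.mul_comm]; exact Nat.div_add_mod _ _
    have hfKn : (cs.length / K) * K ≤ cs.length := by omega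
    have hb1K : (b + 1) * K ≤ cs.length :=
      le_trans (Nat.mul_le_mul_right _ (by omega)) hfKn
    have hbKK : b * K + K = (b + 1) * K := by ring
    have hbKlt : b * K < cs.length := by omega
    have hchunk : splitChunks (K - 1) (cs.drop (b * K))
        = (cs.drop (b * K)).take K :: splitChunks (K - 1) (cs.drop ((b + 1) * K)) := by
      rw [splitChunks, dif_neg (by
        intro h; have := List.drop_eq_nil_iff.mp h; omega), show K - 1 + 1 = K by omega]
      rw [List.drop_drop, show b * K + K = (b + 1) * K from (Nat.succ_mul b K).symm]
    have hext : K ≤ extB cs K ((b - 1) * K) ↔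
        (cs.drop ((b - 1) * K)).take K = (cs.drop (b * K)).take K := by
      have hbK : (b - 1) * K + K = b * K := by
        have : (b - 1) * K + K = (b - 1 + 1) * K := (Nat.succ_mul (b - 1) K).symm
        rw [this, show b - 1 + 1 = b by omega]
      have := ext_ge_iff cs K K ((b - 1) * K) (by omega)
      rw [hbK] at this
      exact this
    have hprevlen : ((cs.drop ((b - 1) * K)).take K).length = K := by
      have : (b - 1) * K + K = b * K := by
        have : (b - 1) * K + K = (b - 1 + 1) * K := (Nat.succ_mul (b - 1) K).symm
        rw [this, show b - 1 + 1 = b by omega]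
      simp [List.length_drop]; omega
    rw [hm, List.range'_succ, List.foldl_cons, hchunk]
    by_cases ht : K ≤ extB cs K ((b - 1) * K)
    · rw [if_pos ht]
      have heq : (cs.drop ((b - 1) * K)).take K = (cs.drop (b * K)).take K := hext.mp ht
      rw [costFrom, if_pos heq.symm]
      have h2 := ih (b + 1) (by omega) (by omega) (by omega) cost (r + 1)
      rw [show b + 1 - 1 = b by omega] at h2
      rw [show cs.length / K - (b + 1) = m by omega] at h2
      calc _ = cost + costFrom ((cs.drop (b * K)).take K) (r + 1)
                (splitChunks (K - 1) (cs.drop ((b + 1) * K))) := h2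
        _ = _ := by rw [heq]
    · rw [if_neg ht]
      have hne : (cs.drop (b * K)).take K ≠ (cs.drop ((b - 1) * K)).take K :=
        fun h => ht (hext.mpr h.symm)
      rw [costFrom, if_neg hne, hprevlen]
      have h2 := ih (b + 1) (by omega) (by omega) (by omega)
        (cost + (if r > 1 then ((PySem.Int.toChars r).length : Int) else 0) + (K : Int)) 1
      rw [show b + 1 - 1 = b by omega] at h2
      rw [show cs.length / K - (b + 1) = m by omega] at h2
      calc _ = (cost + (if r > 1 then ((PySem.Int.toChars r).length : Int) else 0) + (K : Int))
                + costFrom ((cs.drop (b * K)).take K) 1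
                  (splitChunks (K - 1) (cs.drop ((b + 1) * K))) := h2
        _ = _ := by simp only [digC]; omega

-- per-interval agreement: the length of A's result string is B's numeric cost
lemma interval_costB (cs : List Char) (K : Nat) (hK1 : 1 ≤ K) (hKn : K < cs.length) :
    finalLen (solLoopA cs (K : Int) (cs.length + 1) 0 [] 0 []) = costB cs K := by
  have hloop := loopA_eq cs K hK1 (cs.length + 1) 0 [] 0 []
    (by omega) (by omega) (fun _ => rfl) (fun h => absurd rfl h)
  rw [show ((0 : Nat) : Int) = (0 : Int) from rfl, List.drop_zero] at hloop
  rw [hloop]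
  have hsplit : splitChunks (K - 1) cs
      = cs.take K :: splitChunks (K - 1) (cs.drop K) := by
    rw [splitChunks, dif_neg (by
      intro h; rw [h] at hKn; simp at hKn), show K - 1 + 1 = K by omega]
  have hc0len : (cs.take K).length = K := by simp; omega
  have hc0ne : cs.take K ≠ [] := by
    intro h; rw [h] at hc0len; simp at hc0len; omega
  have hnonil : [] ∉ splitChunks (K - 1) (cs.drop K) := splitChunks_no_nil _ _
  rw [hsplit, processChunks, if_pos rfl,
    processChunks_len _ _ _ _ hnonil hc0ne]
  have hfull1 : 1 ≤ cs.length / K := (Nat.one_le_div_iff (by omega)).mpr (by omega)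
  have hscan := scan_eq cs K hK1 (cs.length / K - 1) 1 (by omega) hfull1 rfl
    ((K : Int) + ((cs.length % K : Nat) : Int)) 1
  simp only at hscan
  rw [show (1 - 1) * K = 0 by simp, List.drop_zero, show 1 * K = K from Nat.one_mul K] at hscan
  rw [show ((0 : Int) + 1) = 1 from zero_add 1]
  simp only [costB, digC, List.length_nil, Nat.cast_zero, zero_add] at hscan ⊢
  omega

-- ===== VERDICT (by name: the statement is the Claim_ definition above) =====
theorem solution_spec : Claim_equal_solution := by
  intro s _
  unfold Spec_solution
  simp only [solution, solution_alt]
  by_cases hlt : ((s.toList.length : Int) < 2)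
  · rw [if_pos hlt, if_pos hlt]
  · rw [if_neg hlt, if_neg hlt]
    have h2 : 2 ≤ s.toList.length := by
      have : (2 : Int) ≤ (s.toList.length : Int) := not_lt.mp hlt
      exact_mod_cast this
    set cs := s.toList with hcs
    apply PySem.List.foldl_congr_mem
    intro acc k hk
    obtain ⟨hk1, hkn⟩ := PySem.List.mem_pyRange_one.mp hk
    have hkcast : ((k.toNat : Nat) : Int) = k := Int.toNat_of_nonneg (by omega)
    have hK1 : 1 ≤ k.toNat := by omega
    have hKn : k.toNat < cs.length := by omega
    have hc := interval_costB cs k.toNat hK1 hKn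
    simp only [finalLen] at hc
    rw [← hkcast]
    simp only [Int.toNat_natCast]
    simp only [hc]
    rw [min_def]
    split_ifs <;> omega
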